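-- pv_equiv track=rewrite | github.com/plturrell/finsightutils_langchain_for_sap_hana_cloud | langchain_hana/reasoning/benchmark_system.py | _validate_entity_reference
-- ===== SOURCE A (Python) =====
-- def _validate_entity_reference(entity_reference: str) -> bool:
--     """
--     Validate entity reference format and quality.
--
--     Args:
--         entity_reference: The entity reference to validate
--
--     Returns:
--         True if valid, False otherwise
--     """
--     # Skip empty references
--     if not entity_reference:
--         return False
--
--     # Skip references that are too long
--     if len(entity_reference) > 200:
--         return False
--
--     # Check for basic table.column format for many entity types
--     if "." in entity_reference:
--         # Validate each part contains valid identifier characters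
--         parts = entity_reference.split(".")
--         for part in parts:
--             if not part or not all(c.isalnum() or c == '_' for c in part):
--                 return False
--
--     return True
-- ===== SOURCE B (Python) =====
-- def _validate_entity_reference(entity_reference: str) -> bool:
--     # Same guards; the dotted case is validated in one whole-string pass
--     # (boundary/double-dot checks + one character scan) instead of split + nested loop.
--     if not entity_reference:
--         return False
--     if len(entity_reference) > 200:
--         return False
--     if "." in entity_reference:
--         if (entity_reference.startswith(".")
--                 or entity_reference.endswith(".")
--                 or ".." in entity_reference):
--             return False
--         return all(c.isalnum() or c == "_" or c == "." for c in entity_reference)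
--     return True
-- ===== Notes on version B (the rewrite author's own statement) =====
-- stated objective: alternative
-- what changed: Replaces split('.') plus a nested per-part loop by a single whole-string pass: boundary checks (no leading/trailing dot, no '..') plus one flat character scan.
import Mathlib
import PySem

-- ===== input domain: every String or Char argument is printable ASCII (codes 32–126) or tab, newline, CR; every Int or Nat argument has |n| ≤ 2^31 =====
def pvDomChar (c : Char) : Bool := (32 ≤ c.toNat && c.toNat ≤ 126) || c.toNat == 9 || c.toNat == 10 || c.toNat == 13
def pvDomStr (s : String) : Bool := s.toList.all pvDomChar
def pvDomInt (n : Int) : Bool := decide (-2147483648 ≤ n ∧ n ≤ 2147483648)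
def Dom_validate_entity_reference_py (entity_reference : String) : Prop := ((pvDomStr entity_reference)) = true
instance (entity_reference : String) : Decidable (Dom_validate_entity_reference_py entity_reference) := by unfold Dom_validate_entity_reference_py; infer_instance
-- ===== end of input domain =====

-- B validates the dotted case in one whole-string pass (boundary + '..' checks and a flat
-- character scan) instead of A's split('.') with a nested per-part loop; same values everywhere.

-- ===== PORT A =====
def validate_entity_reference_py (entity_reference : String) : Bool :=
  -- if not entity_reference: return False
  if entity_reference.toList = [] then false
  -- if len(entity_reference) > 200: return False
  else if 200 < PySem.Str.len entity_reference then false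
  else if PySem.Str.isIn "." entity_reference then
    -- parts = entity_reference.split("."); sep "." is non-empty, so split is Chars.splitOn
    let parts := PySem.Chars.splitOn entity_reference.toList ".".toList
    -- for part in parts: if not part or not all(...): return False  /  return True
    parts.all (fun part => !part.isEmpty && part.all (fun c => PySem.Chars.isalnum c || c == '_'))
  else true

-- ===== PORT B =====
def validate_entity_reference_py_alt (entity_reference : String) : Bool :=
  if entity_reference.toList = [] then false
  else if 200 < PySem.Str.len entity_reference then false
  else if PySem.Str.isIn "." entity_reference then
    if PySem.Str.startswith entity_reference "." || PySem.Str.endswith entity_reference "."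
        || PySem.Str.isIn ".." entity_reference then false
    else entity_reference.toList.all
        (fun c => PySem.Chars.isalnum c || c == '_' || c == '.')
  else true

-- ===== PRECONDITION & SPEC =====
def Spec_validate_entity_reference_py (entity_reference : String) (out : Bool) : Prop := out = validate_entity_reference_py_alt entity_reference
instance (entity_reference : String) (out : Bool) : Decidable (Spec_validate_entity_reference_py entity_reference out) := by unfold Spec_validate_entity_reference_py; infer_instance

-- ===== CLAIM (what is proved, stated in full; the proofs are below) =====
def Claim_equal_validate_entity_reference_py : Prop := ∀ (entity_reference : String), Dom_validate_entity_reference_py entity_reference → Spec_validate_entity_reference_py entity_reference (validate_entity_reference_py entity_reference)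

-- ===== LEMMAS AND PROOFS =====

-- abbreviation: "good" part characters (alnum or underscore)
def pvOk (c : Char) : Bool := PySem.Chars.isalnum c || c == '_'

theorem pv_modifyHead_id {a : Type} (L : List (List a)) :
    List.modifyHead (fun x => x) L = L := by cases L <;> simp

-- PySem's split with separator ['.'] is Mathlib's List.splitOn '.'
theorem pv_splitOn_go (fuel : Nat) (l cur : List Char) (acc : List (List Char)) (h : l.length ≤ fuel) :
    PySem.Chars.splitOn.go ['.'] fuel l cur acc
      = acc.reverse ++ (l.splitOn '.').modifyHead (cur.reverse ++ ·) := by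
  induction fuel generalizing l cur acc with
  | zero =>
      have hl : l = [] := List.length_eq_zero_iff.mp (Nat.le_zero.mp h)
      subst hl
      simp [PySem.Chars.splitOn.go, List.splitOn]
  | succ fuel ih =>
      cases l with
      | nil => simp [PySem.Chars.splitOn.go, List.splitOn]
      | cons c rest =>
          by_cases hc : c = '.'
          · subst hc
            have hpre : List.isPrefixOf ['.'] ('.' :: rest) = true := by
              simp [List.isPrefixOf]
            rw [show PySem.Chars.splitOn.go ['.'] (fuel + 1) ('.' :: rest) cur acc
                  = PySem.Chars.splitOn.go ['.'] fuel (List.drop 1 ('.' :: rest)) []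
                      (cur.reverse :: acc) by
                simp [PySem.Chars.splitOn.go, hpre]]
            simp only [List.drop_succ_cons, List.drop_zero]
            rw [ih rest [] (cur.reverse :: acc) (by simpa using Nat.lt_succ_iff.mp (by simpa using h))]
            simp [List.splitOn, List.splitOnP_cons, pv_modifyHead_id]
          · have hpre : List.isPrefixOf ['.'] (c :: rest) = false := by
              simp [List.isPrefixOf]
              exact fun hcc => hc (by simpa using hcc.symm)
            rw [show PySem.Chars.splitOn.go ['.'] (fuel + 1) (c :: rest) cur acc
                  = PySem.Chars.splitOn.go ['.'] fuel rest (c :: cur) acc by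
                simp [PySem.Chars.splitOn.go, hpre]]
            rw [ih rest (c :: cur) acc (by simpa using Nat.lt_succ_iff.mp (by simpa using h))]
            have hne := List.splitOnP_ne_nil (fun x => x == '.') rest
            simp only [List.splitOn]
            cases hsp : List.splitOnP (fun x => x == '.') rest with
            | nil => exact absurd hsp hne
            | cons hpart t =>
              simp [List.splitOnP_cons, hc, hsp]

theorem pv_splitOn_eq (cs : List Char) :
    PySem.Chars.splitOn cs ['.'] = cs.splitOn '.' := by
  have := pv_splitOn_go (cs.length + 1) cs [] [] (by omega)
  rw [PySem.Chars.splitOn, this]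
  simp only [List.reverse_nil, List.nil_append]
  exact pv_modifyHead_id _

-- the invariant condition B checks, as a Prop over the character list
def pvQ (cs : List Char) : Prop :=
  cs.getLast? ≠ some '.' ∧ ¬ ['.', '.'] <:+: cs ∧ ∀ c ∈ cs, c = '.' ∨ pvOk c = true

-- the all-parts condition A checks
def pvA (cs : List Char) : Prop :=
  ∀ p ∈ cs.splitOn '.', p ≠ [] ∧ ∀ c ∈ p, pvOk c = true

-- all-parts with the FIRST part allowed to be empty is not needed; instead:
def pvA2 (cs : List Char) : Prop :=
  match cs.splitOn '.' with
  | [] => True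
  | h :: t => (∀ c ∈ h, pvOk c = true) ∧ ∀ p ∈ t, p ≠ [] ∧ ∀ c ∈ p, pvOk c = true

theorem pv_prefix_singleton (rest : List Char) :
    ['.'] <+: rest ↔ rest.head? = some '.' := by
  cases rest with
  | nil => simp
  | cons d r => simp [List.cons_prefix_cons, eq_comm]

theorem pv_suffix_singleton (cs : List Char) :
    ['.'] <:+ cs ↔ cs.getLast? = some '.' := by
  constructor
  · rintro ⟨t, rfl⟩
    simp
  · intro h
    have hne : cs ≠ [] := by rintro rfl; simp at h
    have h2 : cs.getLast hne = '.' := by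
      rw [List.getLast?_eq_some_getLast hne, Option.some.injEq] at h
      exact h.symm ▸ rfl
    refine ⟨cs.dropLast, ?_⟩
    rw [← h2]
    exact List.dropLast_append_getLast hne

theorem pv_Q_cons_dot (rest : List Char) :
    pvQ ('.' :: rest) ↔ rest ≠ [] ∧ rest.head? ≠ some '.' ∧ pvQ rest := by
  cases rest with
  | nil => simp [pvQ]
  | cons d r =>
      simp only [pvQ, List.getLast?_cons_cons, List.infix_cons_iff,
        List.cons_prefix_cons, pv_prefix_singleton, List.mem_cons, ne_eq,
        List.head?_cons, Option.some.injEq, forall_eq_or_imp,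
        List.nil_prefix, and_true, true_and, true_or, @eq_comm _ '.' d]
      tauto

theorem pv_Q_cons (c : Char) (rest : List Char) (hc : c ≠ '.') :
    pvQ (c :: rest) ↔ pvOk c = true ∧ pvQ rest := by
  cases rest with
  | nil => simp [pvQ, hc, List.infix_cons_iff, List.cons_prefix_cons]
  | cons d r =>
      simp only [pvQ, List.getLast?_cons_cons, List.infix_cons_iff,
        List.cons_prefix_cons, List.mem_cons, ne_eq, forall_eq_or_imp, hc]
      tauto

theorem pv_main (cs : List Char) :
    (pvA cs ↔ cs ≠ [] ∧ cs.head? ≠ some '.' ∧ pvQ cs) ∧ (pvA2 cs ↔ pvQ cs) := by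
  induction cs with
  | nil =>
      constructor
      · simp [pvA, List.splitOn]
      · simp [pvA2, List.splitOn, pvQ]
  | cons c rest ih =>
      by_cases hc : c = '.'
      · subst hc
        constructor
        · constructor
          · intro hA
            exact absurd ((hA [] (by simp [List.splitOn, List.splitOnP_cons])).1) (by simp)
          · rintro ⟨-, hh, -⟩
            simp at hh
        · rw [pv_Q_cons_dot, ← ih.1]
          simp only [pvA2, pvA, List.splitOn, List.splitOnP_cons]
          simp
      · obtain ⟨h, t, hsp⟩ : ∃ h t, List.splitOnP (fun x => x == '.') rest = h :: t := by
          cases hsp : List.splitOnP (fun x => x == '.') rest with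
          | nil => exact absurd hsp (List.splitOnP_ne_nil _ _)
          | cons h t => exact ⟨h, t, rfl⟩
        have hsplit : List.splitOn '.' (c :: rest) = (c :: h) :: t := by
          simp [List.splitOn, List.splitOnP_cons, hc, hsp]
        have hA2r : pvA2 rest ↔ ((∀ x ∈ h, pvOk x = true) ∧
            ∀ p ∈ t, p ≠ [] ∧ ∀ x ∈ p, pvOk x = true) := by
          simp [pvA2, List.splitOn, hsp]
        have hmerge : ((∀ x ∈ c :: h, pvOk x = true) ∧
              ∀ p ∈ t, p ≠ [] ∧ ∀ x ∈ p, pvOk x = true) ↔ pvOk c = true ∧ pvA2 rest := by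
          rw [hA2r]
          simp only [List.mem_cons, forall_eq_or_imp]
          tauto
        have hkey : pvA (c :: rest) ↔ pvOk c = true ∧ pvA2 rest := by
          rw [← hmerge]
          simp only [pvA, hsplit, List.mem_cons, forall_eq_or_imp, ne_eq,
            reduceCtorEq, not_false_eq_true, true_and]
        have hA2c : pvA2 (c :: rest) ↔ pvOk c = true ∧ pvA2 rest := by
          rw [← hmerge]
          simp only [pvA2, hsplit]
        have hQc := pv_Q_cons c rest hc
        constructor
        · rw [hkey, ih.2, hQc]
          simp [hc]
        · rw [hA2c, ih.2, hQc]

-- ===== VERDICT (by name: the statement is the Claim_ definition above) =====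
theorem validate_entity_reference_py_spec : Claim_equal_validate_entity_reference_py := by
  intro s _
  unfold Spec_validate_entity_reference_py validate_entity_reference_py
    validate_entity_reference_py_alt
  by_cases h0 : s.toList = []
  · simp [h0]
  · simp only [h0, if_false]
    by_cases h1 : 200 < PySem.Str.len s
    · simp only [h1, if_true]
    · simp only [h1, if_false]
      by_cases h2 : PySem.Str.isIn "." s = true
      · simp only [h2, if_true]
        have hdot : (".").toList = ['.'] := rfl
        have hmain := pv_main s.toList
        have hA : ((PySem.Chars.splitOn s.toList (".").toList).all
              (fun part => !part.isEmpty && part.all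
                (fun c => PySem.Chars.isalnum c || c == '_'))) = true ↔ pvA s.toList := by
          rw [hdot, pv_splitOn_eq]
          simp [pvA, pvOk, List.all_eq_true]
        have hsb : PySem.Str.startswith s "." = PySem.Chars.startswith s.toList ['.'] := by
          simp [hdot]
        have heb : PySem.Str.endswith s "." = PySem.Chars.endswith s.toList ['.'] := by
          simp [hdot]
        have hddb : PySem.Str.isIn ".." s = PySem.Chars.isIn ['.', '.'] s.toList := by
          simp [show ("..").toList = ['.', '.'] from rfl]
        have hsp : PySem.Chars.startswith s.toList ['.'] = true
            ↔ s.toList.head? = some '.' := by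
          rw [PySem.Chars.startswith_iff, pv_prefix_singleton]
        have hep : PySem.Chars.endswith s.toList ['.'] = true
            ↔ s.toList.getLast? = some '.' := by
          rw [PySem.Chars.endswith_iff, pv_suffix_singleton]
        have hdp : PySem.Chars.isIn ['.', '.'] s.toList = true
            ↔ ['.', '.'] <:+: s.toList := PySem.Chars.isIn_iff_infix _ _
        by_cases h3 : (PySem.Str.startswith s "." || PySem.Str.endswith s "."
            || PySem.Str.isIn ".." s) = true
        · simp only [h3, if_true]
          rw [Bool.eq_false_iff]
          intro hAt
          obtain ⟨-, hhd, hQ⟩ := hmain.1.mp (hA.mp hAt)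
          rw [hsb, heb, hddb] at h3
          rcases Bool.or_eq_true_iff.mp h3 with h4 | h5
          · rcases Bool.or_eq_true_iff.mp h4 with hx | hx
            · exact hhd (hsp.mp hx)
            · exact hQ.1 (hep.mp hx)
          · exact hQ.2.1 (hdp.mp h5)
        · simp only [h3]
          rw [hsb, heb, hddb] at h3
          simp only [Bool.or_eq_true, not_or] at h3
          obtain ⟨⟨hs, he⟩, hdd⟩ := h3
          rw [Bool.eq_iff_iff, hA, hmain.1]
          simp only [Bool.false_eq_true, if_false]
          constructor
          · rintro ⟨-, -, hQ⟩
            simp only [List.all_eq_true]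
            intro c hc
            rcases hQ.2.2 c hc with rfl | hok
            · simp
            · simp only [pvOk, Bool.or_eq_true] at hok
              rcases hok with h | h <;> simp [h]
          · intro hall
            refine ⟨h0, fun hh => hs (hsp.mpr hh),
              fun hh => he (hep.mpr hh), fun hh => hdd (hdp.mpr hh), ?_⟩
            intro c hc
            have := (List.all_eq_true.mp hall) c hc
            simp only [Bool.or_eq_true, beq_iff_eq] at this
            rcases this with (h | h) | h
            · exact Or.inr (by simp [pvOk, h])
            · exact Or.inr (by simp [pvOk, h])
            · exact Or.inl h
      · have h2c : PySem.Chars.isIn ['.'] s.toList = false := by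
          have hb : PySem.Str.isIn "." s = PySem.Chars.isIn ['.'] s.toList := by
            simp [show (".").toList = ['.'] from rfl]
          rw [← hb, Bool.eq_false_iff]
          exact h2
        simp [h2c]
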